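-- pv_equiv track=rewrite | github.com/Veresta/M1 | Optimisation/REGUEME_MENAA/cut.py | get_all_optimized_cut
-- ===== SOURCE A (Python) =====
-- def get_all_optimized_cut(objectives, barSize):
-- 	"""
-- 	@param objectives : size of wanted bars | barSize : default bar size
-- 	@return list of the possible cuts
-- 	Take a list of wanted size and return all cut of a bar with size barSize to obtain it.
-- 	"""
-- 	res = []
-- 	size_possible = barSize // objectives[0] #2 à la première itération
-- 	if len(objectives) == 1:
-- 		return [[size_possible]]
-- 	for i in range(size_possible + 1): #0, 1, 2
-- 		tmp_remains = i * objectives[0] #barSize restant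
-- 		combinations = get_all_optimized_cut(objectives[1:], barSize - tmp_remains) # 100,50 puis 50 puis return de la val
-- 		for elem in combinations:
-- 			elem.insert(0, i) #Ajout pour la val grande (120) et ajout pour la val moyenne (100)
-- 			res.append(elem)
-- 	return res
-- ===== SOURCE B (Python) =====
-- def get_all_optimized_cut(objectives, barSize):
--     """Iterative worklist version: expand partial (prefix, remaining) states
--     level by level in order, then finalize with the last objective."""
--     worklist = [([], barSize)]
--     for obj in objectives[:-1]:
--         new_worklist = []
--         for prefix, remaining in worklist:
--             for i in range(remaining // obj + 1):
--                 new_worklist.append((prefix + [i], remaining - i * obj))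
--         worklist = new_worklist
--     last = objectives[-1]
--     return [prefix + [remaining // last] for prefix, remaining in worklist]
-- ===== Notes on version B (the rewrite author's own statement) =====
-- stated objective: alternative
-- what changed: Replaces the recursion over the tail of objectives by an iterative worklist of (prefix, remaining) partial states expanded level by level and finalized with the last objective, preserving the exact lexicographic order.
-- outside the precondition, e.g. on get_all_optimized_cut([-1, 0], 5): A returns [], B returns []
import Mathlib
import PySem

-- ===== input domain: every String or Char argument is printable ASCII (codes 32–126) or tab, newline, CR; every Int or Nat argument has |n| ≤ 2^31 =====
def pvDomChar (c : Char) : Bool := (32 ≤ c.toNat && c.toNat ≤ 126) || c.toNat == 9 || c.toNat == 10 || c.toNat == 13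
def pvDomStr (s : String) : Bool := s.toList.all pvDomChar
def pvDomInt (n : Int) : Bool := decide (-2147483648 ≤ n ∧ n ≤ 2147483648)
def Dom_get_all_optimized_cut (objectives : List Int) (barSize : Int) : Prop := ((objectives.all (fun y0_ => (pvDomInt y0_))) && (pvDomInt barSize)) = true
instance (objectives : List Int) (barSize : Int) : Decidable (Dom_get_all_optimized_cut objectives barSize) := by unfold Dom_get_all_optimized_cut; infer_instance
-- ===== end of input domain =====

-- B replaces A's recursion by an iterative worklist of (prefix, remaining) partial states; same output, same order.


-- ===== PORT A =====
def get_all_optimized_cut (objectives : List Int) (barSize : Int) : List (List Int) :=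
  match objectives with
  | [] => []  -- objectives[0] raises IndexError in Python; excluded by Pre_
  | o :: rest =>
    let size_possible := PySem.Int.floordiv barSize o
    if rest.isEmpty then [[size_possible]]
    else
      (PySem.List.pyRange 0 (size_possible + 1) 1).foldl
        (fun res i =>
          let tmp_remains := i * o
          let combinations := get_all_optimized_cut rest (barSize - tmp_remains)
          combinations.foldl (fun res elem => res ++ [i :: elem]) res)
        []

-- ===== PORT B =====
def get_all_optimized_cut_alt (objectives : List Int) (barSize : Int) : List (List Int) :=
  let worklist :=
    objectives.dropLast.foldl
      (fun worklist obj =>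
        worklist.foldl
          (fun new_worklist pr =>
            (PySem.List.pyRange 0 (PySem.Int.floordiv pr.2 obj + 1) 1).foldl
              (fun new_worklist i => new_worklist ++ [(pr.1 ++ [i], pr.2 - i * obj)])
              new_worklist)
          [])
      [(([] : List Int), barSize)]
  let last := objectives.getLastD 0  -- objectives[-1]; Python raises IndexError on []; excluded by Pre_
  worklist.map (fun pr => pr.1 ++ [PySem.Int.floordiv pr.2 last])

-- ===== PRECONDITION & SPEC =====
-- Pre_ excludes empty objectives (IndexError) and lists containing a zero objective (ZeroDivisionError
-- whenever the recursion reaches that position; when an earlier empty range prevents reaching it, both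
-- A and B return [] and agree, so the exclusion is slightly wider than the raise set).
def Pre_get_all_optimized_cut (objectives : List Int) (barSize : Int) : Prop :=
  objectives ≠ [] ∧ ¬ (0 ∈ objectives)
instance (objectives : List Int) (barSize : Int) : Decidable (Pre_get_all_optimized_cut objectives barSize) := by unfold Pre_get_all_optimized_cut; infer_instance

def pvWitness_get_all_optimized_cut : List Int × Int := ([2, 1], 5)

def Spec_get_all_optimized_cut (objectives : List Int) (barSize : Int) (out : List (List Int)) : Prop := out = get_all_optimized_cut_alt objectives barSize
instance (objectives : List Int) (barSize : Int) (out : List (List Int)) : Decidable (Spec_get_all_optimized_cut objectives barSize out) := by unfold Spec_get_all_optimized_cut; infer_instance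

-- ===== CLAIM (what is proved, stated in full; the proofs are below) =====
def Claim_equal_get_all_optimized_cut : Prop := ∀ (objectives : List Int) (barSize : Int), Dom_get_all_optimized_cut objectives barSize → Pre_get_all_optimized_cut objectives barSize → Spec_get_all_optimized_cut objectives barSize (get_all_optimized_cut objectives barSize)

-- ===== LEMMAS AND PROOFS =====

-- One expansion level of B's worklist loop, as a named function for the proofs.
def pvStep (obj : Int) (wl : List (List Int × Int)) : List (List Int × Int) :=
  wl.foldl
    (fun new_worklist pr =>
      (PySem.List.pyRange 0 (PySem.Int.floordiv pr.2 obj + 1) 1).foldl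
        (fun new_worklist i => new_worklist ++ [(pr.1 ++ [i], pr.2 - i * obj)])
        new_worklist)
    []

lemma pvStep_eq_flatMap (obj : Int) (wl : List (List Int × Int)) :
    pvStep obj wl = wl.flatMap (fun pr =>
      (PySem.List.pyRange 0 (PySem.Int.floordiv pr.2 obj + 1) 1).map
        (fun i => (pr.1 ++ [i], pr.2 - i * obj))) := by
  unfold pvStep
  rw [show (fun (new_worklist : List (List Int × Int)) (pr : List Int × Int) =>
      (PySem.List.pyRange 0 (PySem.Int.floordiv pr.2 obj + 1) 1).foldl
        (fun new_worklist i => new_worklist ++ [(pr.1 ++ [i], pr.2 - i * obj)]) new_worklist)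
    = (fun new_worklist pr => new_worklist ++
        (PySem.List.pyRange 0 (PySem.Int.floordiv pr.2 obj + 1) 1).map
          (fun i => (pr.1 ++ [i], pr.2 - i * obj)))
    from funext fun nw => funext fun pr => PySem.List.foldl_append_singleton_eq_map _ _ _]
  exact PySem.List.foldl_append_eq_flatMap _ _ _

-- A's value on a nonempty-tail head: the loop body as a flatMap.
lemma get_all_optimized_cut_cons (o : Int) (rest : List Int) (b : Int) (h : rest ≠ []) :
    get_all_optimized_cut (o :: rest) b =
      (PySem.List.pyRange 0 (PySem.Int.floordiv b o + 1) 1).flatMap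
        (fun i => (get_all_optimized_cut rest (b - i * o)).map (fun e => i :: e)) := by
  rw [get_all_optimized_cut]
  simp only [List.isEmpty_eq_false_iff.mpr h, if_neg Bool.false_ne_true]
  rw [show (fun (res : List (List Int)) (i : Int) =>
      (get_all_optimized_cut rest (b - i * o)).foldl (fun res elem => res ++ [i :: elem]) res)
    = (fun res i => res ++ (get_all_optimized_cut rest (b - i * o)).map (fun e => i :: e))
    from funext fun res => funext fun i => PySem.List.foldl_append_singleton_eq_map _ _ _]
  exact PySem.List.foldl_append_eq_flatMap _ _ _

-- Main invariant: finalizing the worklist obtained from `front` equals, for each partial state,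
-- A's result on front ++ [last] with the prefix glued on.
lemma pvMain (front : List Int) (last : Int) (wl : List (List Int × Int)) :
    (front.foldl (fun wl obj => pvStep obj wl) wl).map
      (fun pr => pr.1 ++ [PySem.Int.floordiv pr.2 last])
    = wl.flatMap (fun pr =>
        (get_all_optimized_cut (front ++ [last]) pr.2).map (fun e => pr.1 ++ e)) := by
  induction front generalizing wl with
  | nil =>
    simp only [List.foldl_nil, List.nil_append]
    rw [List.map_eq_flatMap]
    refine List.flatMap_congr ?_
    intro pr _
    rw [get_all_optimized_cut]
    simp
  | cons o fr ih =>
    rw [List.foldl_cons, ih, pvStep_eq_flatMap, List.flatMap_assoc]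
    refine List.flatMap_congr ?_
    intro pr _
    rw [List.flatMap_map, List.cons_append,
        get_all_optimized_cut_cons o (fr ++ [last]) pr.2 (by simp), List.map_flatMap]
    refine List.flatMap_congr ?_
    intro i _
    simp [Function.comp, List.map_map, List.append_assoc]

-- ===== VERDICT (by name: the statement is the Claim_ definition above) =====
theorem get_all_optimized_cut_spec : Claim_equal_get_all_optimized_cut := by
  intro objectives barSize _ hpre
  unfold Spec_get_all_optimized_cut get_all_optimized_cut_alt
  obtain ⟨hne, -⟩ := hpre
  have hdecomp : objectives = objectives.dropLast ++ [objectives.getLast hne] :=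
    (List.dropLast_append_getLast hne).symm
  have hlastD : objectives.getLastD 0 = objectives.getLast hne := by
    cases objectives with
    | nil => exact absurd rfl hne
    | cons a l => simp [List.getLastD_eq_getLast?, List.getLast?_eq_some_getLast]
  simp only [hlastD]
  have := pvMain objectives.dropLast (objectives.getLast hne) [(([] : List Int), barSize)]
  rw [show (fun (wl : List (List Int × Int)) (obj : Int) =>
        wl.foldl (fun new_worklist pr =>
          (PySem.List.pyRange 0 (PySem.Int.floordiv pr.2 obj + 1) 1).foldl
            (fun new_worklist i => new_worklist ++ [(pr.1 ++ [i], pr.2 - i * obj)])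
            new_worklist) [])
      = (fun wl obj => pvStep obj wl) from rfl]
  rw [this, ← hdecomp]
  simp
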